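-- pv_equiv track=rewrite | github.com/dabmenez/biocomp | trab1/bacter_final.py | find_all_maximal_palindromes
-- ===== SOURCE A (Python) =====
-- COMP = str.maketrans("ACGTacgt", "TGCAtgca")
--
-- def rev_comp(s: str) -> str:
--     """Retorna o complemento reverso de uma sequência de DNA."""
--     return s.translate(COMP)[::-1]
--
-- def find_all_maximal_palindromes(seq):
--     """
--     Encontra todos os palíndromos maximais de qualquer tamanho.
--
--     Args:
--         seq (str): Sequência de DNA
--
--     Returns:
--         list: Lista de tuplas (início, fim, sequência) em coordenadas 0-based
--     """
--     palindromes = []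
--     n = len(seq)
--
--     # Palíndromos de comprimento ímpar (centro único)
--     for i in range(n):
--         l, r = i, i
--         while l >= 0 and r < n and seq[l].upper() == rev_comp(seq[r]).upper():
--             l -= 1
--             r += 1
--         # O palíndromo maximal é de l+1 a r-1
--         if r - l > 1:  # Pelo menos 2 bases
--             palindromes.append((l + 1, r, seq[l+1:r]))
--
--     # Palíndromos de comprimento par (centro entre duas bases)
--     for i in range(n - 1):
--         l, r = i, i + 1
--         while l >= 0 and r < n and seq[l].upper() == rev_comp(seq[r]).upper():
--             l -= 1
--             r += 1
--         if r - l > 2:  # Pelo menos 4 bases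
--             palindromes.append((l + 1, r, seq[l+1:r]))
--
--     # Remover duplicatas e ordenar
--     return sorted(list(set(palindromes)))
-- ===== SOURCE B (Python) =====
-- COMP = str.maketrans("ACGTacgt", "TGCAtgca")
--
-- def find_all_maximal_palindromes(seq):
--     """Manacher's algorithm adapted to complement matching (the match relation
--     U[x] == complement(U[y]) is symmetric and mirrors inside a palindromic window,
--     so the rightmost-window hint is sound): two linear passes compute the maximal
--     radius at every odd and even center, then the intervals are emitted and sorted."""
--     n = len(seq)
--     U = seq.upper()
--     T = seq.translate(COMP).upper()   # T[x] == complement of U[x]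
--     # d1[i] = number of matched offsets around odd center i (offset 0 = centre itself)
--     d1 = [0] * n
--     l, r = 0, -1
--     for i in range(n):
--         k = min(d1[l + r - i], r - i) if i <= r else 0
--         while i - k >= 0 and i + k < n and U[i - k] == T[i + k]:
--             k += 1
--         d1[i] = k
--         if i + k - 1 > r:
--             l, r = i - k + 1, i + k - 1
--     # d2[i] = number of matched offsets around the even centre between i and i+1
--     d2 = [0] * (n - 1 if n > 0 else 0)
--     l, r = 0, -1
--     for i in range(n - 1):
--         k = min(d2[l + r - 1 - i], r - i) if i < r else 0
--         while i - k >= 0 and i + 1 + k < n and U[i - k] == T[i + 1 + k]: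
--             k += 1
--         d2[i] = k
--         if i + k > r:
--             l, r = i - k + 1, i + k
--     out = []
--     for i in range(n):
--         k = d1[i]
--         if k >= 1:
--             out.append((i - k + 1, i + k, seq[i - k + 1: i + k]))
--     for i in range(n - 1):
--         k = d2[i]
--         if k >= 1:
--             out.append((i - k + 1, i + k + 1, seq[i - k + 1: i + k + 1]))
--     out.sort()
--     return out
-- ===== Notes on version B (the rewrite author's own statement) =====
-- stated objective: faster
-- what changed: A expands outward around each of the 2n-1 centres independently (quadratic on palindrome-rich strings, with per-character rev_comp/translate/upper calls); B runs Manacher's algorithm adapted to the complement-match relation: two linear passes over precomputed uppercase and uppercase-complement tables reuse the mirror radius inside the rightmost palindromic window, then emit the intervals (provably duplicate-free, so no set()) and sort once.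
import Mathlib
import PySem

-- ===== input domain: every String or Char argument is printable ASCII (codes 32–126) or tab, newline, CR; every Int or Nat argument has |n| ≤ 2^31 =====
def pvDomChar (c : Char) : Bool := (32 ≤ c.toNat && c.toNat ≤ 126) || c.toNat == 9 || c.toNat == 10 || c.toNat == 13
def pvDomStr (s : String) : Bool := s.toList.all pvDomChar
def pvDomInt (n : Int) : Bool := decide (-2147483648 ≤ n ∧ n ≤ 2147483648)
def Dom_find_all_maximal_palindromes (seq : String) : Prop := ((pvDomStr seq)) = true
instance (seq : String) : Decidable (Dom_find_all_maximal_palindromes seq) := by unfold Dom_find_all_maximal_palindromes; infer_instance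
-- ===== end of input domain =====

-- B replaces A's per-center outward expansion by Manacher's algorithm adapted to the
-- complement-match relation (which is symmetric and mirrors inside a palindromic window),
-- computing every maximal radius in two linear passes; objective: faster (asymptotic).


-- ===== PORT A =====

-- the module-level table COMP = str.maketrans("ACGTacgt", "TGCAtgca"), as a character map
def pvCompChar (c : Char) : Char :=
  if c = 'A' then 'T' else if c = 'C' then 'G' else if c = 'G' then 'C' else if c = 'T' then 'A'
  else if c = 'a' then 't' else if c = 'c' then 'g' else if c = 'g' then 'c' else if c = 't' then 'a'
  else c

-- rev_comp(s) = s.translate(COMP)[::-1]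
def pvRevComp (s : List Char) : List Char := (s.map pvCompChar).reverse

-- the while-loop condition: l >= 0 and r < n and seq[l].upper() == rev_comp(seq[r]).upper()
-- (the guards precede the accesses, so the pyGetD defaults are unreachable)
def pvCondA (cs : List Char) (l r : Int) : Bool :=
  decide (0 ≤ l) && decide (r < (cs.length : Int)) &&
    (PySem.Chars.upper [PySem.List.pyGetD cs l ' '] ==
      PySem.Chars.upper (pvRevComp [PySem.List.pyGetD cs r ' ']))

-- the expansion while-loop (fuel ≥ l+1 suffices; the port passes n+1)
def pvExpandA (cs : List Char) : Nat → Int → Int → Int × Int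
  | 0, l, r => (l, r)
  | fuel + 1, l, r => if pvCondA cs l r then pvExpandA cs fuel (l - 1) (r + 1) else (l, r)

-- sorted(...) / list.sort() on the (int, int, str) tuples: Python compares them
-- lexicographically; every tuple's string is seq[a:b], determined by the two ints, so the
-- lexicographic (int, int) key is exact here.  (Shared by both ports: the same built-in sort.)
def pvSortPals (xs : List (Int × Int × String)) : List (Int × Int × String) :=
  PySem.List.sorted xs (fun p => toLex (p.1, p.2.1))

def find_all_maximal_palindromes (seq : String) : List (Int × Int × String) :=
  let cs := seq.toList
  let n := cs.length
  let odds : List (Int × Int × String) :=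
    (PySem.List.pyRange 0 (n : Int)).foldl (fun acc i =>
      let p := pvExpandA cs (n + 1) i i
      if p.2 - p.1 > 1 then
        acc ++ [(p.1 + 1, p.2, String.ofList (PySem.List.slice cs (some (p.1 + 1)) (some p.2)))]
      else acc) []
  let pals : List (Int × Int × String) :=
    (PySem.List.pyRange 0 ((n : Int) - 1)).foldl (fun acc i =>
      let p := pvExpandA cs (n + 1) i (i + 1)
      if p.2 - p.1 > 2 then
        acc ++ [(p.1 + 1, p.2, String.ofList (PySem.List.slice cs (some (p.1 + 1)) (some p.2)))]
      else acc) odds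
  pvSortPals (PySem.Set.ofList pals)

-- ===== PORT B =====

-- B's while-loop condition: i - k >= 0 and i + off + k < n and U[i-k] == T[i+off+k]
-- (off = 0 in the odd pass, 1 in the even pass; guards precede the accesses)
def pvCondB (U T : List Char) (n : Nat) (a b : Int) : Bool :=
  decide (0 ≤ a) && decide (b < (n : Int)) &&
    (PySem.List.pyGetD U a ' ' == PySem.List.pyGetD T b ' ')

-- the hint-started expansion 'while … : k += 1' (k is a Python int)
def pvGrow (U T : List Char) (n : Nat) (i off : Int) : Nat → Int → Int
  | 0, k => k
  | fuel + 1, k => if pvCondB U T n (i - k) (i + off + k) then pvGrow U T n i off fuel (k + 1) else k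

-- Python list assignment d[i] = v (negative index wraps as in Python; the passes only
-- assign at 0 ≤ i < len d)
def pvListSet (xs : List Int) (i : Int) (v : Int) : List Int :=
  if 0 ≤ i then xs.set i.toNat v else xs.set (xs.length - (-i).toNat) v

-- one Manacher pass of Source B; the odd-centre loop is the instance off = 0, the even-centre
-- loop the instance off = 1 (each generic expression instantiates to exactly Source B's text)
def pvPass (U T : List Char) (n : Nat) (off : Int) : List Int × Int × Int :=
  (PySem.List.pyRange 0 ((n : Int) - off)).foldl (fun s i =>
    let d := s.1
    let l := s.2.1
    let r := s.2.2
    -- the array read is in range whenever the guard holds (proved below); pyGetD's default is unreachable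
    let k0 : Int := if i + off ≤ r then min (PySem.List.pyGetD d (l + r - off - i) 0) (r - i) else 0
    let k := pvGrow U T n i off (n + 1) k0
    let d' := pvListSet d i k
    if i + off + k - 1 > r then (d', i - k + 1, i + off + k - 1) else (d', l, r))
    (List.replicate (n - off.toNat) 0, 0, -1)

def find_all_maximal_palindromes_alt (seq : String) : List (Int × Int × String) :=
  let cs := seq.toList
  let n := cs.length
  let U := PySem.Chars.upper cs
  let T := PySem.Chars.upper (cs.map pvCompChar)
  let d1 := (pvPass U T n 0).1
  let d2 := (pvPass U T n 1).1
  let out1 : List (Int × Int × String) :=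
    (PySem.List.pyRange 0 (n : Int)).foldl (fun acc i =>
      let k := PySem.List.pyGetD d1 i 0
      if 1 ≤ k then
        acc ++ [(i - k + 1, i + k, String.ofList (PySem.List.slice cs (some (i - k + 1)) (some (i + k))))]
      else acc) []
  let out : List (Int × Int × String) :=
    (PySem.List.pyRange 0 ((n : Int) - 1)).foldl (fun acc i =>
      let k := PySem.List.pyGetD d2 i 0
      if 1 ≤ k then
        acc ++ [(i - k + 1, i + k + 1, String.ofList (PySem.List.slice cs (some (i - k + 1)) (some (i + k + 1))))]
      else acc) out1
  pvSortPals out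

-- ===== PRECONDITION & SPEC =====
def Spec_find_all_maximal_palindromes (seq : String) (out : List (Int × Int × String)) : Prop := out = find_all_maximal_palindromes_alt seq
instance (seq : String) (out : List (Int × Int × String)) : Decidable (Spec_find_all_maximal_palindromes seq out) := by unfold Spec_find_all_maximal_palindromes; infer_instance

-- ===== CLAIM (what is proved, stated in full; the proofs are below) =====
def Claim_equal_find_all_maximal_palindromes : Prop := ∀ (seq : String), Dom_find_all_maximal_palindromes seq → Spec_find_all_maximal_palindromes seq (find_all_maximal_palindromes seq)

-- ===== LEMMAS AND PROOFS =====

-- proof-side names for B's two tables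
def pvU (cs : List Char) : List Char := PySem.Chars.upper cs
def pvT (cs : List Char) : List Char := PySem.Chars.upper (cs.map pvCompChar)

lemma pv_toNat_ofNat (m : Nat) (h : m < 55296) : (Char.ofNat m).toNat = m := by
  have hval : m.isValidChar := Or.inl h
  simp [Char.ofNat, hval, Char.ofNatAux, Char.toNat, UInt32.toNat_ofNatLT]

-- the uppercase complement map; pvT's entries are pvCompU of pvU's
def pvCompU (c : Char) : Char :=
  if c = 'A' then 'T' else if c = 'T' then 'A' else if c = 'C' then 'G' else if c = 'G' then 'C' else c

lemma pvCompU_invol (c : Char) : pvCompU (pvCompU c) = c := by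
  unfold pvCompU; split_ifs <;> simp_all

lemma pv_bridge (c : Char) :
    PySem.Chars.upperChar (pvCompChar c) = pvCompU (PySem.Chars.upperChar c) := by
  by_cases h1 : c = 'A'; · subst h1; decide
  by_cases h2 : c = 'C'; · subst h2; decide
  by_cases h3 : c = 'G'; · subst h3; decide
  by_cases h4 : c = 'T'; · subst h4; decide
  by_cases h5 : c = 'a'; · subst h5; decide
  by_cases h6 : c = 'c'; · subst h6; decide
  by_cases h7 : c = 'g'; · subst h7; decide
  by_cases h8 : c = 't'; · subst h8; decide
  have hcc : pvCompChar c = c := by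
    unfold pvCompChar
    rw [if_neg h1, if_neg h2, if_neg h3, if_neg h4, if_neg h5, if_neg h6, if_neg h7, if_neg h8]
  rw [hcc]
  unfold PySem.Chars.upperChar
  by_cases hl : PySem.Chars.islower c = true
  · rw [if_pos hl]
    simp only [PySem.Chars.islower, Bool.and_eq_true, decide_eq_true_eq] at hl
    have hb : 97 ≤ c.toNat ∧ c.toNat ≤ 122 :=
      ⟨by exact_mod_cast hl.1, by exact_mod_cast hl.2⟩
    have hne : ∀ m : Nat, m < 100 → c.toNat ≠ 97 + m → Char.ofNat (c.toNat - 32) ≠ Char.ofNat (65 + m) := by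
      intro m hmlt hm he
      have := congrArg Char.toNat he
      rw [pv_toNat_ofNat _ (by omega), pv_toNat_ofNat _ (by omega)] at this
      omega
    have e5 : c.toNat ≠ 97 := fun h => h5 (by rw [← Char.ofNat_toNat c, h])
    have e6 : c.toNat ≠ 99 := fun h => h6 (by rw [← Char.ofNat_toNat c, h])
    have e7 : c.toNat ≠ 103 := fun h => h7 (by rw [← Char.ofNat_toNat c, h])
    have e8 : c.toNat ≠ 116 := fun h => h8 (by rw [← Char.ofNat_toNat c, h])
    unfold pvCompU
    rw [if_neg (by simpa using hne 0 (by omega) (by omega)), if_neg (by simpa using hne 19 (by omega) (by omega)),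
        if_neg (by simpa using hne 2 (by omega) (by omega)), if_neg (by simpa using hne 6 (by omega) (by omega))]
  · rw [if_neg hl]
    unfold pvCompU
    rw [if_neg h1, if_neg h4, if_neg h2, if_neg h3]

-- the Nat-offset run of consecutive matches around centre (i, i+off), starting at offset k
def pvRadius (U T : List Char) (n : Nat) (off : Int) : Nat → Int → Nat → Nat
  | 0, _, k => k
  | fuel + 1, i, k => if pvCondB U T n (i - k) (i + off + k) then pvRadius U T n off fuel i (k + 1) else k

-- the maximal radius at centre (i, i+off)
def pvRad (U T : List Char) (n : Nat) (off : Int) (i : Int) : Nat :=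
  pvRadius U T n off (n + 1) i 0

-- the per-centre maximal palindrome (none when the guard 'at least 2/4 bases' fails)
def pvItem (cs : List Char) (off : Int) (i : Int) : Option (Int × Int × String) :=
  let R := pvRad (pvU cs) (pvT cs) cs.length off i
  if R = 0 then none
  else some (i - R + 1, i + off + R,
    String.ofList (PySem.List.slice cs (some (i - (R : Int) + 1)) (some (i + off + R))))

-- A's and B's loop conditions agree whenever l < n and 0 ≤ r (always true at the call sites)
lemma pv_cond_eq (cs : List Char) (l r : Int) (hl : l < (cs.length : Int)) (hr : 0 ≤ r) :
    pvCondA cs l r = pvCondB (pvU cs) (pvT cs) cs.length l r := by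
  unfold pvCondA pvCondB pvU pvT
  by_cases h0 : 0 ≤ l
  · by_cases h1 : r < (cs.length : Int)
    · have e1 := PySem.List.pyGetD_eq_getElem cs (i := l) ' ' h0 hl
      have e2 := PySem.List.pyGetD_eq_getElem cs (i := r) ' ' hr h1
      have e3 := PySem.List.pyGetD_eq_getElem (cs.map PySem.Chars.upperChar) (i := l) ' ' h0
        (by simpa using hl)
      have e4 := PySem.List.pyGetD_eq_getElem (cs.map (PySem.Chars.upperChar ∘ pvCompChar)) (i := r) ' ' hr
        (by simpa using h1)
      simp [h0, h1, e1, e2, e3, e4, PySem.Chars.upper, pvRevComp, List.getElem_map, List.map_map]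
    · simp [h1]
  · simp [h0]

-- A's expansion loop lands exactly radius-many steps out
lemma pv_expand_radius (cs : List Char) (fuel : Nat) (i off : Int) (k : Nat)
    (hi : i < (cs.length : Int)) (hj : 0 ≤ i + off) :
    pvExpandA cs fuel (i - k) (i + off + k) =
      (i - (pvRadius (pvU cs) (pvT cs) cs.length off fuel i k : Int),
       i + off + (pvRadius (pvU cs) (pvT cs) cs.length off fuel i k : Int)) := by
  induction fuel generalizing k with
  | zero => simp [pvExpandA, pvRadius]
  | succ fuel ih =>
      have hc := pv_cond_eq cs (i - k) (i + off + k) (by omega) (by omega)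
      simp only [pvExpandA, pvRadius, hc]
      by_cases h : pvCondB (pvU cs) (pvT cs) cs.length (i - k) (i + off + k) = true
      · simp only [h, if_true]
        have := ih (k + 1)
        push_cast at this ⊢
        have e1 : i - (k : Int) - 1 = i - ((k : Int) + 1) := by ring
        have e2 : i + off + (k : Int) + 1 = i + off + ((k : Int) + 1) := by ring
        rw [e1, e2, this]
      · simp [h]

-- unpacking pvCondB
lemma pvCondB_iff (U T : List Char) (n : Nat) (a b : Int) :
    pvCondB U T n a b = true ↔
      0 ≤ a ∧ b < (n : Int) ∧ PySem.List.pyGetD U a ' ' = PySem.List.pyGetD T b ' ' := by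
  simp [pvCondB, and_assoc]

-- the bridge at table level: T's entry is pvCompU of U's
lemma pv_getT (cs : List Char) (x : Int) (h0 : 0 ≤ x) (h1 : x < (cs.length : Int)) :
    PySem.List.pyGetD (pvT cs) x ' ' = pvCompU (PySem.List.pyGetD (pvU cs) x ' ') := by
  unfold pvU pvT PySem.Chars.upper
  rw [PySem.List.pyGetD_eq_getElem _ ' ' h0 (by simpa using h1),
      PySem.List.pyGetD_eq_getElem _ ' ' h0 (by simpa using h1)]
  simp only [List.getElem_map]
  exact pv_bridge _

-- the match relation is symmetric (both positions in range)
lemma pv_M_sym (cs : List Char) (a b : Int) (ha0 : 0 ≤ a) (ha1 : a < (cs.length : Int))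
    (hb0 : 0 ≤ b) (hb1 : b < (cs.length : Int)) :
    pvCondB (pvU cs) (pvT cs) cs.length a b = pvCondB (pvU cs) (pvT cs) cs.length b a := by
  have ta := pv_getT cs a ha0 ha1
  have tb := pv_getT cs b hb0 hb1
  rw [Bool.eq_iff_iff, pvCondB_iff, pvCondB_iff, ta, tb]
  constructor
  · rintro ⟨-, -, h⟩; exact ⟨hb0, ha1, by rw [h, pvCompU_invol]⟩
  · rintro ⟨-, -, h⟩; exact ⟨ha0, hb1, by rw [h, pvCompU_invol]⟩

-- the mirror transfer: inside a palindromic window [l, r], a match around the mirror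
-- centre transfers to a match around the centre (i, i+off)
lemma pv_mirror (cs : List Char) (l r i off : Int) (m : Nat)
    (hwin : ∀ x, l ≤ x → x ≤ r → pvCondB (pvU cs) (pvT cs) cs.length x (l + r - x) = true)
    (_hl : 0 ≤ l) (hr : r < (cs.length : Int))
    (hcen : l + r ≤ 2 * i + off) (_hir : i + off ≤ r) (hoff : 0 ≤ off)
    (hm1 : pvCondB (pvU cs) (pvT cs) cs.length (l + r - i - off - m) (l + r - i + m) = true)
    (hb : (m : Int) ≤ r - i - off) :
    pvCondB (pvU cs) (pvT cs) cs.length (i - m) (i + off + m) = true := by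
  have w1 := (pvCondB_iff _ _ _ _ _).mp (hwin (i - m) (by omega) (by omega))
  have w2 := (pvCondB_iff _ _ _ _ _).mp (hwin (i + off + m) (by omega) (by omega))
  have hm1' := (pvCondB_iff _ _ _ _ _).mp hm1
  have e1 : l + r - (i - (m : Int)) = l + r - i + m := by ring
  have e2 : l + r - (i + off + (m : Int)) = l + r - i - off - m := by ring
  rw [e1] at w1
  rw [e2] at w2
  -- U[i-m] = U[b'] through the shared mirror-right position
  have hUU : PySem.List.pyGetD (pvU cs) (i - m) ' ' =
      PySem.List.pyGetD (pvU cs) (l + r - i - off - m) ' ' := by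
    rw [w1.2.2, hm1'.2.2]
  have tb' := pv_getT cs (l + r - i - off - m) hm1'.1 (by omega)
  have tb2 := pv_getT cs (i + off + m) (by omega) (by omega)
  refine (pvCondB_iff _ _ _ _ _).mpr ⟨by omega, by omega, ?_⟩
  rw [tb2, w2.2.2, tb', ← hUU, pvCompU_invol]

-- the run counter computes the LEAST offset at which the condition fails
lemma pvRadius_general (U T : List Char) (n : Nat) (off i : Int) :
    ∀ (fuel : Nat) (k : Nat),
      (∃ m : Nat, k ≤ m ∧ m < k + fuel ∧ pvCondB U T n (i - m) (i + off + m) = false) →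
      k ≤ pvRadius U T n off fuel i k ∧
      pvCondB U T n (i - (pvRadius U T n off fuel i k : Int))
          (i + off + (pvRadius U T n off fuel i k : Int)) = false ∧
      (∀ m : Nat, k ≤ m → m < pvRadius U T n off fuel i k →
        pvCondB U T n (i - m) (i + off + m) = true) := by
  intro fuel
  induction fuel with
  | zero =>
      intro k ⟨m, hm1, hm2, _⟩
      omega
  | succ fuel ih =>
      intro k hex
      by_cases hc : pvCondB U T n (i - k) (i + off + k) = true
      · have hex' : ∃ m : Nat, k + 1 ≤ m ∧ m < (k + 1) + fuel ∧
            pvCondB U T n (i - m) (i + off + m) = false := by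
          obtain ⟨m, hm1, hm2, hm3⟩ := hex
          refine ⟨m, ?_, by omega, hm3⟩
          rcases Nat.eq_or_lt_of_le hm1 with h | h
          · subst h; rw [hc] at hm3; cases hm3
          · omega
        obtain ⟨ih1, ih2, ih3⟩ := ih (k + 1) hex'
        have hr : pvRadius U T n off (fuel + 1) i k = pvRadius U T n off fuel i (k + 1) := by
          simp [pvRadius, hc]
        refine ⟨by omega, by rw [hr]; exact ih2, ?_⟩
        intro m hm1 hm2
        rw [hr] at hm2
        rcases Nat.eq_or_lt_of_le hm1 with h | h
        · subst h; exact hc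
        · exact ih3 m (by omega) hm2
      · have hr : pvRadius U T n off (fuel + 1) i k = k := by
          simp [pvRadius]
          intro h; exact absurd h hc
        refine ⟨by omega, ?_, ?_⟩
        · rw [hr]; exact Bool.not_eq_true _ ▸ (by simpa using hc)
        · intro m hm1 hm2; rw [hr] at hm2; omega

lemma pvRad_props (U T : List Char) (n : Nat) (off i : Int) (hj : 0 ≤ i + off) :
    pvCondB U T n (i - (pvRad U T n off i : Int)) (i + off + (pvRad U T n off i : Int)) = false ∧
    (∀ m : Nat, m < pvRad U T n off i → pvCondB U T n (i - m) (i + off + m) = true) ∧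
    pvRad U T n off i ≤ n := by
  have hex : ∃ m : Nat, 0 ≤ m ∧ m < 0 + (n + 1) ∧
      pvCondB U T n (i - m) (i + off + m) = false := by
    refine ⟨n, by omega, by omega, ?_⟩
    have : ¬ (i + off + (n : Int) < (n : Int)) := by omega
    simp [pvCondB, this]
  obtain ⟨-, h2, h3⟩ := pvRadius_general U T n off i (n + 1) 0 hex
  have e : pvRadius U T n off (n + 1) i 0 = pvRad U T n off i := rfl
  rw [e] at h2 h3
  refine ⟨h2, fun m hm => h3 m (by omega) hm, ?_⟩
  by_contra h
  have := h3 n (by omega) (by omega)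
  have hnc : ¬ (i + off + (n : Int) < (n : Int)) := by omega
  simp [pvCondB, hnc] at this

-- the hint-started while loop reaches the same least failing offset
lemma pvGrow_eq (U T : List Char) (n : Nat) (off i : Int)
    (hfalse : pvCondB U T n (i - (pvRad U T n off i : Int)) (i + off + (pvRad U T n off i : Int)) = false)
    (hall : ∀ m : Nat, m < pvRad U T n off i → pvCondB U T n (i - m) (i + off + m) = true) :
    ∀ (fuel : Nat) (k0 : Int), 0 ≤ k0 → k0 ≤ (pvRad U T n off i : Int) →
      (pvRad U T n off i : Int) < k0 + fuel →
      pvGrow U T n i off fuel k0 = (pvRad U T n off i : Int) := by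
  intro fuel
  induction fuel with
  | zero => intro k0 h0 h1 h2; omega
  | succ fuel ih =>
      intro k0 h0 h1 h2
      rcases eq_or_lt_of_le h1 with h | h
      · rw [← h] at hfalse
        simp only [pvGrow, hfalse, Bool.false_eq_true, if_false]
        exact h.symm ▸ rfl
      · have hk : k0 = ((k0.toNat : Nat) : Int) := by omega
        have hc : pvCondB U T n (i - k0) (i + off + k0) = true := by
          rw [hk]; exact hall k0.toNat (by omega)
        simp only [pvGrow, hc, if_true]
        exact ih (k0 + 1) (by omega) (by omega) (by omega)

-- the fold body of pvPass, named (pvPass (pvU cs) (pvT cs) cs.length off unfolds to a foldl of pvStep)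
def pvStep (cs : List Char) (off : Int) (s : List Int × Int × Int) (i : Int) : List Int × Int × Int :=
  let d := s.1
  let l := s.2.1
  let r := s.2.2
  let k0 : Int := if i + off ≤ r then min (PySem.List.pyGetD d (l + r - off - i) 0) (r - i) else 0
  let k := pvGrow (pvU cs) (pvT cs) cs.length i off (cs.length + 1) k0
  let d' := pvListSet d i k
  if i + off + k - 1 > r then (d', i - k + 1, i + off + k - 1) else (d', l, r)

-- the Manacher loop invariant after the first m iterations
def pvInv (cs : List Char) (off : Int) (m : Nat) (s : List Int × Int × Int) : Prop :=
  s.1.length = cs.length - off.toNat ∧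
  (∀ t : Nat, t < cs.length - off.toNat →
    PySem.List.pyGetD s.1 (t : Int) 0 =
      if t < m then ((pvRad (pvU cs) (pvT cs) cs.length off (t : Int) : Nat) : Int) else 0) ∧
  0 ≤ s.2.1 ∧ s.2.2 < (cs.length : Int) ∧ s.2.1 + s.2.2 < 2 * (m : Int) + off ∧
  (∀ x : Int, s.2.1 ≤ x → x ≤ s.2.2 →
    pvCondB (pvU cs) (pvT cs) cs.length x (s.2.1 + s.2.2 - x) = true)

lemma pv_step_inv (cs : List Char) (off : Int) (hoff : off = 0 ∨ off = 1) (m : Nat)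
    (hm : (m : Int) < (cs.length : Int) - off) (s : List Int × Int × Int)
    (hinv : pvInv cs off m s) : pvInv cs off (m + 1) (pvStep cs off s (m : Int)) := by
  obtain ⟨hlen, hent, hl0, hrn, hcen, hwin⟩ := hinv
  have hoff0 : 0 ≤ off := by rcases hoff with h | h <;> omega
  have hoff1 : off ≤ 1 := by rcases hoff with h | h <;> omega
  obtain ⟨hfalse, hall, hRn⟩ :=
    pvRad_props (pvU cs) (pvT cs) cs.length off (m : Int) (by omega)
  set R := pvRad (pvU cs) (pvT cs) cs.length off (m : Int) with hRdef
  -- the final radius is boxed in by the string borders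
  have hR1 : (R : Int) ≤ (m : Int) + 1 := by
    by_contra hcon
    have hc := (pvCondB_iff _ _ _ _ _).mp (hall (m + 1) (by omega))
    push_cast at hc
    omega
  have hR2 : (R : Int) ≤ (cs.length : Int) - off - m := by
    by_contra hcon
    have hc := (pvCondB_iff _ _ _ _ _).mp
      (hall ((cs.length : Int) - off - m).toNat (by omega))
    omega
  -- the hint never overshoots the true radius
  set k0 : Int := if (m : Int) + off ≤ s.2.2 then
      min (PySem.List.pyGetD s.1 (s.2.1 + s.2.2 - off - (m : Int)) 0) (s.2.2 - (m : Int))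
    else 0 with hk0def
  have hkey : 0 ≤ k0 ∧ k0 ≤ (R : Int) := by
    by_cases hg : (m : Int) + off ≤ s.2.2
    · set jc : Int := s.2.1 + s.2.2 - off - (m : Int) with hjcdef
      have hjc0 : 0 ≤ jc := by omega
      have hjcm : jc < (m : Int) := by omega
      have hjcn : jc < (cs.length : Int) - off := by omega
      have hjnat : jc.toNat < cs.length - off.toNat := by
        rcases hoff with h | h <;> subst h <;> push_cast [Int.toNat_one] at * <;> omega
      have hentry : PySem.List.pyGetD s.1 jc 0 =
          ((pvRad (pvU cs) (pvT cs) cs.length off jc : Nat) : Int) := by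
        have h1 := hent jc.toNat hjnat
        rw [if_pos (by omega : jc.toNat < m)] at h1
        rw [show ((jc.toNat : Nat) : Int) = jc from by omega] at h1
        exact h1
      obtain ⟨-, hallj, -⟩ :=
        pvRad_props (pvU cs) (pvT cs) cs.length off jc (by omega)
      rw [hk0def, if_pos hg, hentry]
      have htrans : ∀ m' : Nat,
          (m' : Int) < min ((pvRad (pvU cs) (pvT cs) cs.length off jc : Nat) : Int) (s.2.2 - (m : Int)) →
          pvCondB (pvU cs) (pvT cs) cs.length ((m : Int) - m') ((m : Int) + off + m') = true := by
        intro m' hm'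
        have hcj := hallj m' (by omega)
        rw [show jc - (m' : Int) = s.2.1 + s.2.2 - (m : Int) - off - m' from by omega,
            show jc + off + (m' : Int) = s.2.1 + s.2.2 - (m : Int) + m' from by omega] at hcj
        exact pv_mirror cs s.2.1 s.2.2 (m : Int) off m' hwin hl0 hrn (by omega) (by omega)
          hoff0 hcj (by omega)
      refine ⟨le_min (by positivity) (by omega), ?_⟩
      by_contra hcon
      have := htrans R (lt_of_not_ge hcon)
      rw [this] at hfalse
      cases hfalse
    · rw [hk0def, if_neg hg]
      exact ⟨le_refl 0, by positivity⟩
  -- the while loop therefore lands exactly at the radius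
  have hkR : pvGrow (pvU cs) (pvT cs) cs.length (m : Int) off (cs.length + 1) k0 = (R : Int) :=
    pvGrow_eq (pvU cs) (pvT cs) cs.length off (m : Int) hfalse hall (cs.length + 1) k0
      hkey.1 hkey.2 (by omega)
  -- the updated array
  have hset : pvListSet s.1 (m : Int) ((R : Nat) : Int) = s.1.set m ((R : Nat) : Int) := by
    simp [pvListSet]
  have hd'len : (pvListSet s.1 (m : Int) ((R : Nat) : Int)).length = cs.length - off.toNat := by
    rw [hset]; simpa using hlen
  have hd'ent : ∀ t : Nat, t < cs.length - off.toNat →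
      PySem.List.pyGetD (pvListSet s.1 (m : Int) ((R : Nat) : Int)) (t : Int) 0 =
        if t < m + 1 then ((pvRad (pvU cs) (pvT cs) cs.length off (t : Int) : Nat) : Int) else 0 := by
    intro t ht
    rw [hset, PySem.List.pyGetD_eq_getElem _ 0 (by omega) (by simp [hlen]; omega)]
    simp only [Int.toNat_natCast, List.getElem_set]
    by_cases he : m = t
    · subst he
      rw [if_pos rfl, if_pos (by omega)]
    · rw [if_neg he]
      have h1 := hent t ht
      rw [PySem.List.pyGetD_eq_getElem _ 0 (by omega) (by simp [hlen]; omega)] at h1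
      simp only [Int.toNat_natCast] at h1
      rw [h1]
      split_ifs <;> first | rfl | omega
  -- assemble, by cases on the window update
  simp only [pvStep]
  rw [← hk0def, hkR]
  by_cases hgt : (m : Int) + off + ((R : Nat) : Int) - 1 > s.2.2
  · rw [if_pos hgt]
    unfold pvInv
    dsimp only
    refine ⟨hd'len, hd'ent, by omega, by omega, by push_cast; omega, ?_⟩
    intro x hx1 hx2
    rw [show (m : Int) - ((R : Nat) : Int) + 1 + ((m : Int) + off + ((R : Nat) : Int) - 1) - x =
        2 * (m : Int) + off - x from by ring]
    by_cases hxi : x ≤ (m : Int)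
    · have hlt : ((m : Int) - x).toNat < R := by omega
      have hc := hall _ hlt
      rw [show (m : Int) - ((((m : Int) - x).toNat : Nat) : Int) = x from by omega,
          show (m : Int) + off + ((((m : Int) - x).toNat : Nat) : Int) = 2 * (m : Int) + off - x
            from by omega] at hc
      exact hc
    · have h0t : 0 ≤ x - (m : Int) - off := by omega
      have hlt : (x - (m : Int) - off).toNat < R := by omega
      have hc := hall _ hlt
      rw [show (m : Int) + off + (((x - (m : Int) - off).toNat : Nat) : Int) = x from by omega,
          show (m : Int) - (((x - (m : Int) - off).toNat : Nat) : Int) = 2 * (m : Int) + off - x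
            from by omega] at hc
      rw [pv_M_sym cs x (2 * (m : Int) + off - x) (by omega) (by omega) (by omega) (by omega)]
      exact hc
  · rw [if_neg hgt]
    unfold pvInv
    dsimp only
    exact ⟨hd'len, hd'ent, hl0, hrn, by push_cast at hcen ⊢; omega, hwin⟩

lemma pv_pass_inv (cs : List Char) (off : Int) (hoff : off = 0 ∨ off = 1) :
    ∀ m : Nat, (m : Int) ≤ (cs.length : Int) - off →
      pvInv cs off m ((PySem.List.pyRange 0 (m : Int)).foldl (pvStep cs off)
        (List.replicate (cs.length - off.toNat) 0, 0, -1)) := by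
  intro m
  induction m with
  | zero =>
      intro _
      rw [PySem.List.pyRange_one_eq_nil (by omega)]
      simp only [List.foldl_nil]
      refine ⟨by simp, ?_, by show (0:Int) ≤ 0; norm_num,
        by show (-1:Int) < (cs.length : Int); omega,
        by show (0:Int) + -1 < 2 * ((0:Nat):Int) + off; rcases hoff with h | h <;> subst h <;> norm_num,
        ?_⟩
      swap
      · intro x h1 h2
        have h1' : (0:Int) ≤ x := h1
        have h2' : x ≤ -1 := h2
        omega
      intro t ht
      rw [PySem.List.pyGetD_eq_getElem _ 0 (by omega) (by simp; omega)]
      simp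
  | succ m ih =>
      intro hle
      have hcast : ((m + 1 : Nat) : Int) = (m : Int) + 1 := by push_cast; ring
      rw [hcast, PySem.List.pyRange_one_succ_right (by omega), List.foldl_append, List.foldl_cons, List.foldl_nil]
      exact pv_step_inv cs off hoff m (by omega) _ (ih (by omega))

lemma pv_pass_entries (cs : List Char) (off : Int) (hoff : off = 0 ∨ off = 1) :
    ∀ t : Nat, t < cs.length - off.toNat →
      PySem.List.pyGetD (pvPass (pvU cs) (pvT cs) cs.length off).1 (t : Int) 0 =
        ((pvRad (pvU cs) (pvT cs) cs.length off (t : Int) : Nat) : Int) := by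
  intro t ht
  have hM : 0 < cs.length - off.toNat := by omega
  have hrange : PySem.List.pyRange 0 ((cs.length : Int) - off) =
      PySem.List.pyRange 0 ((cs.length - off.toNat : Nat) : Int) := by
    rcases hoff with h | h <;> subst h
    · simp
    · congr 1
      push_cast [Int.toNat_one]
      omega
  have hpass : pvPass (pvU cs) (pvT cs) cs.length off =
      (PySem.List.pyRange 0 ((cs.length : Int) - off)).foldl (pvStep cs off)
        (List.replicate (cs.length - off.toNat) 0, 0, -1) := rfl
  have hinv := pv_pass_inv cs off hoff (cs.length - off.toNat)
    (by rcases hoff with h | h <;> subst h <;> push_cast [Int.toNat_one] <;> omega)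
  rw [hpass, hrange]
  exact (hinv.2.1 t ht).trans (by rw [if_pos ht])

-- a fold that conditionally appends is a filterMap
lemma pv_foldl_append_opt {α β : Type} (g : α → Option β) (l : List α)
    (f : List β → α → List β) (hf : ∀ acc x, x ∈ l → f acc x = acc ++ (g x).toList) :
    ∀ acc, l.foldl f acc = acc ++ l.filterMap g := by
  induction l with
  | nil => intro acc; simp
  | cons x t ih =>
      intro acc
      have hx := hf acc x (by simp)
      simp only [List.foldl_cons, hx, List.filterMap_cons]
      cases hgx : g x with
      | none => simp at hx ⊢; rw [ih (fun a y hy => hf a y (by simp [hy])) acc]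
      | some b =>
          rw [ih (fun a y hy => hf a y (by simp [hy]))]
          simp

-- every produced tuple's first two components determine its generating centre
lemma pv_item_sum (cs : List Char) (off i : Int) (x : Int × Int × String)
    (hx : pvItem cs off i = some x) : x.1 + x.2.1 = 2 * i + off + 1 := by
  unfold pvItem at hx
  by_cases h : pvRad (pvU cs) (pvT cs) cs.length off i = 0
  · simp [h] at hx
  · simp only [h, if_false] at hx
    cases hx
    dsimp
    ring

lemma pv_main (seq : String) :
    find_all_maximal_palindromes seq = find_all_maximal_palindromes_alt seq := by
  simp only [find_all_maximal_palindromes, find_all_maximal_palindromes_alt]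
  set cs := seq.toList with hcs
  set n := cs.length with hn
  -- A's two folds are filterMaps of pvItem
  have hodd : ∀ acc : List (Int × Int × String),
      (PySem.List.pyRange 0 (n : Int)).foldl (fun acc i =>
        let p := pvExpandA cs (n + 1) i i
        if p.2 - p.1 > 1 then
          acc ++ [(p.1 + 1, p.2, String.ofList (PySem.List.slice cs (some (p.1 + 1)) (some p.2)))]
        else acc) acc
      = acc ++ (PySem.List.pyRange 0 (n : Int)).filterMap (pvItem cs 0) := by
    intro acc
    refine pv_foldl_append_opt _ _ _ ?_ acc
    intro a i hi
    obtain ⟨h0, h1⟩ := PySem.List.mem_pyRange_one.mp hi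
    have he := pv_expand_radius cs (n + 1) i 0 0 (by exact_mod_cast h1) (by omega)
    simp only [Nat.cast_zero, sub_zero, add_zero] at he
    set K := pvRadius (pvU cs) (pvT cs) n 0 (n + 1) i 0 with hK
    simp only [he, pvItem, pvRad]
    rw [← hn, ← hK]
    by_cases hk : K = 0
    · simp [hk]
    · simp only [hk, if_false, Option.toList_some]
      rw [if_pos (by omega), show i + 0 + (K : Int) = i + (K : Int) from by ring]
  have heven : ∀ acc : List (Int × Int × String),
      (PySem.List.pyRange 0 ((n : Int) - 1)).foldl (fun acc i =>
        let p := pvExpandA cs (n + 1) i (i + 1)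
        if p.2 - p.1 > 2 then
          acc ++ [(p.1 + 1, p.2, String.ofList (PySem.List.slice cs (some (p.1 + 1)) (some p.2)))]
        else acc) acc
      = acc ++ (PySem.List.pyRange 0 ((n : Int) - 1)).filterMap (pvItem cs 1) := by
    intro acc
    refine pv_foldl_append_opt _ _ _ ?_ acc
    intro a i hi
    obtain ⟨h0, h1⟩ := PySem.List.mem_pyRange_one.mp hi
    have he := pv_expand_radius cs (n + 1) i 1 0 (by omega) (by omega)
    simp only [Nat.cast_zero, sub_zero, add_zero] at he
    set K := pvRadius (pvU cs) (pvT cs) n 1 (n + 1) i 0 with hK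
    simp only [he, pvItem, pvRad]
    rw [← hn, ← hK]
    by_cases hk : K = 0
    · simp [hk]
    · simp only [hk, if_false, Option.toList_some]
      rw [if_pos (by omega)]
  -- B's two folds are the same filterMaps, read off the Manacher arrays
  have hent0 : ∀ t : Nat, t < n - (0 : Int).toNat →
      PySem.List.pyGetD (pvPass (PySem.Chars.upper cs) (PySem.Chars.upper (cs.map pvCompChar)) n 0).1 (t : Int) 0 =
        ((pvRad (pvU cs) (pvT cs) n 0 (t : Int) : Nat) : Int) :=
    pv_pass_entries cs 0 (Or.inl rfl)
  have hent1 : ∀ t : Nat, t < n - (1 : Int).toNat →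
      PySem.List.pyGetD (pvPass (PySem.Chars.upper cs) (PySem.Chars.upper (cs.map pvCompChar)) n 1).1 (t : Int) 0 =
        ((pvRad (pvU cs) (pvT cs) n 1 (t : Int) : Nat) : Int) :=
    pv_pass_entries cs 1 (Or.inr rfl)
  have hodd' : ∀ acc : List (Int × Int × String),
      (PySem.List.pyRange 0 (n : Int)).foldl (fun acc i =>
        let k := PySem.List.pyGetD (pvPass (PySem.Chars.upper cs) (PySem.Chars.upper (cs.map pvCompChar)) n 0).1 i 0
        if 1 ≤ k then
          acc ++ [(i - k + 1, i + k, String.ofList (PySem.List.slice cs (some (i - k + 1)) (some (i + k))))]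
        else acc) acc
      = acc ++ (PySem.List.pyRange 0 (n : Int)).filterMap (pvItem cs 0) := by
    intro acc
    refine pv_foldl_append_opt _ _ _ ?_ acc
    intro a i hi
    obtain ⟨h0, h1⟩ := PySem.List.mem_pyRange_one.mp hi
    have hcast : ((i.toNat : Nat) : Int) = i := by omega
    have hei := hent0 i.toNat (by simp [Int.toNat_zero]; omega)
    rw [hcast] at hei
    simp only [hei, pvItem, pvRad]
    rw [← hn]
    set K := pvRadius (pvU cs) (pvT cs) n 0 (n + 1) i 0 with hK
    by_cases hk : K = 0
    · simp [hk]
    · simp only [hk, if_false, Option.toList_some]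
      rw [if_pos (by omega), show i + 0 + (K : Int) = i + (K : Int) from by ring]
  have heven' : ∀ acc : List (Int × Int × String),
      (PySem.List.pyRange 0 ((n : Int) - 1)).foldl (fun acc i =>
        let k := PySem.List.pyGetD (pvPass (PySem.Chars.upper cs) (PySem.Chars.upper (cs.map pvCompChar)) n 1).1 i 0
        if 1 ≤ k then
          acc ++ [(i - k + 1, i + k + 1, String.ofList (PySem.List.slice cs (some (i - k + 1)) (some (i + k + 1))))]
        else acc) acc
      = acc ++ (PySem.List.pyRange 0 ((n : Int) - 1)).filterMap (pvItem cs 1) := by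
    intro acc
    refine pv_foldl_append_opt _ _ _ ?_ acc
    intro a i hi
    obtain ⟨h0, h1⟩ := PySem.List.mem_pyRange_one.mp hi
    have hcast : ((i.toNat : Nat) : Int) = i := by omega
    have hei := hent1 i.toNat (by simp [Int.toNat_one]; omega)
    rw [hcast] at hei
    simp only [hei, pvItem, pvRad]
    rw [← hn]
    set K := pvRadius (pvU cs) (pvT cs) n 1 (n + 1) i 0 with hK
    by_cases hk : K = 0
    · simp [hk]
    · simp only [hk, if_false, Option.toList_some]
      rw [if_pos (by omega), show i + 1 + (K : Int) = i + (K : Int) + 1 from by ring]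
  rw [hodd, heven, hodd', heven']
  simp only [List.nil_append]
  -- distinct centres produce distinct tuples, so set() is the identity here
  have hnodd : ((PySem.List.pyRange 0 (n : Int)).filterMap (pvItem cs 0)).Nodup := by
    refine List.Nodup.filterMap ?_ (PySem.List.nodup_pyRange_one 0 (n : Int))
    intro a a' b hb hb'
    have s1 := pv_item_sum cs 0 a b (Option.mem_def.mp hb)
    have s2 := pv_item_sum cs 0 a' b (Option.mem_def.mp hb')
    omega
  have hneven : ((PySem.List.pyRange 0 ((n : Int) - 1)).filterMap (pvItem cs 1)).Nodup := by
    refine List.Nodup.filterMap ?_ (PySem.List.nodup_pyRange_one 0 ((n : Int) - 1))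
    intro a a' b hb hb'
    have s1 := pv_item_sum cs 1 a b (Option.mem_def.mp hb)
    have s2 := pv_item_sum cs 1 a' b (Option.mem_def.mp hb')
    omega
  have hdisj : ((PySem.List.pyRange 0 (n : Int)).filterMap (pvItem cs 0)).Disjoint
      ((PySem.List.pyRange 0 ((n : Int) - 1)).filterMap (pvItem cs 1)) := by
    intro x hx hx'
    obtain ⟨i, -, hi⟩ := List.mem_filterMap.mp hx
    obtain ⟨i', -, hi'⟩ := List.mem_filterMap.mp hx'
    have s1 := pv_item_sum cs 0 i x hi
    have s2 := pv_item_sum cs 1 i' x hi'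
    omega
  rw [PySem.Set.ofList_eq_self_of_nodup _ (hnodd.append hneven hdisj)]

-- ===== VERDICT (by name: the statement is the Claim_ definition above) =====
theorem find_all_maximal_palindromes_spec : Claim_equal_find_all_maximal_palindromes := by
  intro seq _
  unfold Spec_find_all_maximal_palindromes
  exact pv_main seq
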